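-- pv_equiv track=rewrite | github.com/ALTA-DE1-CHARIS-14101996/Algo-DS-Part1 | problem4/main.py | generate_primes_grid
-- ===== SOURCE A (Python) =====
-- def isPrime(n):
--   if n < 2 :
--       return False
--   else:
--     for i in range(2, n):
--         if n % i == 0:
--             return False
--     return True
--
-- def generate_primes_grid(width, height, start):
--     # grid = []
--     # start_prime = start + 1
--     # for i in range(height):
--     #     row = []
--     #     for j in range(width):
--     #         while not isPrime(start_prime):
--     #             start_prime += 1
--     #         row.append(start_prime)
--     #         start_prime += 1
--     #     grid.append(row)
--
--     # result = ""
--     # if len(str(row)) == 1: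
--     #     for row in grid:
--     #         row_str = "  ".join(map(str, row))
--     #         result += row_str + "\n"
--     # else:
--     #     for row in grid:
--     #         row_str = " ".join(map(str, row))
--     #         result += row_str + "\n"
--     # return result
--     # result = ""
--     # for i in range(start, start + height):
--     #     row = []
--     #     start = start + 1
--     #     for j in range(width):
--     #         while not isPrime(start):
--     #             start += 1
--     #         row.append(start)
--     #         start += 1
--     #     if len(str(row[0])) == 1:
--     #         row_str = "  ".join(map(str, row))
--     #     else:
--     #         row_str = " ".join(map(str, row))
--     #     result += row_str + "\n"
--     # return result
--
--     result = ""
--     start = start + 1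
--     for i in range(start, start + height):
--         row = []
--         for j in range(width):
--             while not isPrime(start):
--                 start += 1
--             row.append(start)
--             start += 1
--         row_str = ""
--         for idx, num in enumerate(row):
--             if idx == 0:
--                 row_str += str(num)
--             elif len(str(num)) == 1:
--                 row_str += "  " + str(num)
--             else:
--                 row_str += " " + str(num)
--         result += row_str + "\n"
--     return result
-- ===== SOURCE B (Python) =====
-- def _is_prime(n):
--     if n < 2:
--         return False
--     i = 2
--     while i * i <= n:
--         if n % i == 0:
--             return False
--         i += 1
--     return True
--
--
-- def generate_primes_grid(width, height, start):
--     w = width if width > 0 else 0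
--     h = height if height > 0 else 0
--     # phase 1: the w*h consecutive primes strictly greater than start, flat
--     primes = []
--     p = start + 1
--     while len(primes) < w * h:
--         if _is_prime(p):
--             primes.append(p)
--         p += 1
--     # phase 2: chunk into h rows of w and format each row
--     out = []
--     for r in range(h):
--         row = primes[r * w:(r + 1) * w]
--         cells = [str(row[0])] if row else []
--         for num in row[1:]:
--             cells.append(('  ' if len(str(num)) == 1 else ' ') + str(num))
--         out.append(''.join(cells) + '\n')
--     return ''.join(out)
-- ===== Notes on version B (the rewrite author's own statement) =====
-- stated objective: faster
-- what changed: A interleaves prime generation with row building and tests primality by trial division over all of range(2,n); B first collects the width*height consecutive primes above start into one flat list using a divisor test that stops at i*i>n, then chunks that list into rows and formats them in a separate pass.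
import Mathlib
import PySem

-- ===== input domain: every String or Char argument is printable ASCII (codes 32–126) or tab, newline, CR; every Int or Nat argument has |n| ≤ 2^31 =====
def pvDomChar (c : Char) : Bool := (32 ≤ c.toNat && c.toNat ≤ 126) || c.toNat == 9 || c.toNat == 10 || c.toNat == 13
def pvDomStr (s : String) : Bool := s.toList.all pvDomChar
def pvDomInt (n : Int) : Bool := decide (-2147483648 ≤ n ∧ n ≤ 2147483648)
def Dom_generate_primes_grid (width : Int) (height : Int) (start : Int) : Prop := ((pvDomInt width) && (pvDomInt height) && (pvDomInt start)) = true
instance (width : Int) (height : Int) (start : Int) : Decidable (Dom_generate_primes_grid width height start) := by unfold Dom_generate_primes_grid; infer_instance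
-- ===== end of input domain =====

-- B rewrites A's interleaved per-row prime generation as two phases — collect all width*height
-- consecutive primes flat (with a divisor test stopping at i*i > n), then chunk and format — same
-- return value, measurably faster (objective: faster).

-- ===== PORT A =====
-- helper isPrime of A, transliterated (trial division over range(2, n))
def isPrime (n : Int) : Bool :=
  if n < 2 then false
  else (PySem.List.pyRange 2 n 1).all (fun i => !(PySem.Int.mod n i == 0))

-- the 'while not isPrime(start): start += 1' loop of A, run with enough fuel to
-- reach the next prime (findFuel is a cheap arithmetic bound; sufficiency is proved below)
def findFuel (s : Int) : Nat := if s ≤ 2 then (2 - s).toNat + 1 else s.toNat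

def findPrimeFuel : Nat → Int → Int
  | 0, s => s
  | f + 1, s => if isPrime s then s else findPrimeFuel f (s + 1)

def findPrime (s : Int) : Int := findPrimeFuel (findFuel s) s

def generate_primes_grid (width : Int) (height : Int) (start : Int) : String :=
  -- result = ""; start = start + 1
  let start1 := start + 1
  -- for i in range(start, start + height): … (state: (result, start))
  ((PySem.List.pyRange start1 (start1 + height) 1).foldl
    (fun (acc : String × Int) (_i : Int) =>
      -- row = []; for j in range(width): while not isPrime(start): start += 1; row.append(start); start += 1
      let rowSt := (PySem.List.pyRange 0 width 1).foldl
        (fun (a : List Int × Int) (_j : Int) =>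
          let p := findPrime a.2
          (a.1 ++ [p], p + 1)) (([] : List Int), acc.2)
      -- row_str = ""; for idx, num in enumerate(row): …
      let row_str := (PySem.List.enumerate rowSt.1 0).foldl
        (fun (rs : String) (e : Int × Int) =>
          if e.1 == 0 then rs ++ PySem.Int.toStr e.2
          else if PySem.Str.len (PySem.Int.toStr e.2) == 1 then rs ++ ("  " ++ PySem.Int.toStr e.2)
          else rs ++ (" " ++ PySem.Int.toStr e.2)) ""
      (acc.1 ++ (row_str ++ "\n"), rowSt.2)) ("", start1)).1

-- ===== PORT B =====
-- B's _is_prime: trial division stopping at i*i > n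
def isPrimeBFuel : Nat → Int → Int → Bool
  | 0, _, _ => true
  | f + 1, n, i =>
      if i * i ≤ n then
        if PySem.Int.mod n i == 0 then false else isPrimeBFuel f n (i + 1)
      else true

-- fuel (n + 2 - i).toNat is exactly the number of remaining loop steps
def isPrimeBLoop (n : Int) (i : Int) : Bool := isPrimeBFuel (n + 2 - i).toNat n i

def isPrimeB (n : Int) : Bool := if n < 2 then false else isPrimeBLoop n 2

-- B's collection loop 'while len(primes) < w*h: if _is_prime(p): primes.append(p); p += 1',
-- transcribed with the count of still-missing primes as the explicit argument k and
-- enough fuel (the number of loop iterations, summed from the prime gaps) to finish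
def needed (p : Int) : Nat → Nat
  | 0 => 0
  | k + 1 => findFuel p + needed (findPrime p + 1) k

def collectFuel : Nat → Int → Nat → List Int
  | 0, _, _ => []
  | f + 1, p, k =>
      if k = 0 then []
      else if isPrimeB p then p :: collectFuel f (p + 1) (k - 1)
      else collectFuel f (p + 1) k

def collectB (p : Int) (k : Nat) : List Int := collectFuel (needed p k) p k

-- '[str(row[0])] if row else []'
def headCell (row : List Int) : List String :=
  match row with
  | [] => []
  | x :: _ => [PySem.Int.toStr x]

def generate_primes_grid_alt (width : Int) (height : Int) (start : Int) : String :=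
  let w := if width > 0 then width else 0
  let h := if height > 0 then height else 0
  -- phase 1: the w*h consecutive primes strictly greater than start, flat
  let primes := collectB (start + 1) (w * h).toNat
  -- phase 2: chunk into h rows of w and format each
  (PySem.List.pyRange 0 h 1).foldl
    (fun (out : String) (r : Int) =>
      let row := PySem.List.slice primes (some (r * w)) (some ((r + 1) * w))
      let cells := headCell row ++
        (PySem.List.slice row (some 1) none).map
          (fun num => (if PySem.Str.len (PySem.Int.toStr num) == 1 then "  " else " ") ++ PySem.Int.toStr num)
      out ++ (PySem.Str.join "" cells ++ "\n")) ""

-- ===== PRECONDITION & SPEC =====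
def Spec_generate_primes_grid (width : Int) (height : Int) (start : Int) (out : String) : Prop := out = generate_primes_grid_alt width height start
instance (width : Int) (height : Int) (start : Int) (out : String) : Decidable (Spec_generate_primes_grid width height start out) := by unfold Spec_generate_primes_grid; infer_instance

-- ===== CLAIM (what is proved, stated in full; the proofs are below) =====
def Claim_equal_generate_primes_grid : Prop := ∀ (width : Int) (height : Int) (start : Int), Dom_generate_primes_grid width height start → Spec_generate_primes_grid width height start (generate_primes_grid width height start)

-- ===== LEMMAS AND PROOFS =====

-- one formatted cell of a non-leading number
def cellF (num : Int) : String :=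
  (if PySem.Str.len (PySem.Int.toStr num) == 1 then "  " else " ") ++ PySem.Int.toStr num

-- the formatted row, in B's shape
def fmtRow (row : List Int) : String :=
  PySem.Str.join "" (headCell row ++ row.tail.map cellF)

-- the idealised 'next k primes from s, and the cursor afterwards'
def grab (s : Int) : Nat → List Int × Int
  | 0 => ([], s)
  | k + 1 =>
      let p := findPrime s
      let r := grab (p + 1) k
      (p :: r.1, r.2)

-- the whole grid rendered row by row
def rowsStr (w : Nat) : Int → Nat → String
  | _, 0 => ""
  | s, h + 1 => (fmtRow (grab s w).1 ++ "\n") ++ rowsStr w (grab s w).2 h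

theorem join_nil_str : PySem.Str.join "" ([] : List String) = "" := by
  rw [← String.toList_inj]
  simp [PySem.Str.toList_join, PySem.Chars.join_nil]

theorem join_cons_str (c : String) (cs : List String) :
    PySem.Str.join "" (c :: cs) = c ++ PySem.Str.join "" cs := by
  rw [← String.toList_inj]
  cases cs with
  | nil =>
    simp [PySem.Str.toList_join, PySem.Chars.join_singleton, PySem.Chars.join_nil]
  | cons d ds =>
    simp [PySem.Str.toList_join, PySem.Chars.join_cons_cons]

theorem grab_len (k : Nat) : ∀ s : Int, (grab s k).1.length = k := by
  induction k with
  | zero => intro s; simp [grab]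
  | succ k ih => intro s; simp [grab, ih]

theorem grab_add (a : Nat) : ∀ (b : Nat) (s : Int),
    grab s (a + b) = ((grab s a).1 ++ (grab (grab s a).2 b).1, (grab (grab s a).2 b).2) := by
  induction a with
  | zero => intro b s; simp [grab]
  | succ a ih =>
    intro b s
    have : a + 1 + b = (a + b) + 1 := by omega
    rw [this]
    simp [grab, ih, List.cons_append]

theorem loop_iff_aux (fuel : Nat) : ∀ (n i : Int), (n + 2 - i).toNat ≤ fuel → 1 ≤ i →
    (isPrimeBFuel fuel n i = true ↔ ∀ j : Int, i ≤ j → j * j ≤ n → ¬ j ∣ n) := by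
  induction fuel with
  | zero =>
    intro n i hf hi
    rw [show isPrimeBFuel 0 n i = true from rfl]
    simp only [true_iff]
    intro j hj hjj _
    have h1 : (0 : Int) ≤ j - 1 := by omega
    have h2 : j ≤ j * j := by nlinarith
    have h4 : j ≤ n := le_trans h2 hjj
    omega
  | succ fuel ih =>
    intro n i hf hi
    show (if i * i ≤ n then
        if PySem.Int.mod n i == 0 then false else isPrimeBFuel fuel n (i + 1)
      else true) = true ↔ _
    by_cases h1 : i * i ≤ n
    · rw [if_pos h1]
      have hin : i ≤ n := by nlinarith
      by_cases hmod : PySem.Int.mod n i = 0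
      · rw [if_pos (by simp [hmod])]
        constructor
        · intro hc; exact absurd hc (by simp)
        · intro hall
          exact absurd ((PySem.Int.mod_eq_zero_iff_dvd n i).mp hmod) (hall i le_rfl h1)
      · rw [if_neg (by simp [hmod])]
        rw [ih n (i + 1) (by omega) (by omega)]
        constructor
        · intro hall j hj hjj
          rcases eq_or_lt_of_le hj with h | hlt
          · subst h
            exact fun hd => hmod ((PySem.Int.mod_eq_zero_iff_dvd n i).mpr hd)
          · exact hall j (by omega) hjj
        · intro hall j hj hjj
          exact hall j (by omega) hjj
    · rw [if_neg h1]
      simp only [true_iff]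
      intro j hj hjj
      exact absurd hjj (by nlinarith)

theorem isPrime_iff_prime (n : Int) (h2 : 2 ≤ n) : (isPrime n = true ↔ n.toNat.Prime) := by
  unfold isPrime
  rw [if_neg (by omega)]
  simp only [List.all_eq_true, Bool.not_eq_eq_eq_not, Bool.not_true, beq_eq_false_iff_ne, ne_eq,
    PySem.Int.mod_eq_zero_iff_dvd]
  constructor
  · intro hall
    rw [Nat.prime_def_lt]
    refine ⟨by omega, ?_⟩
    intro m hm hmd
    by_contra hm1
    have hm0 : m ≠ 0 := by rintro rfl; simp at hmd; omega
    have hm2 : 2 ≤ m := by omega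
    have : ¬ ((m : Int) ∣ n) := by
      refine hall (m : Int) ?_
      rw [PySem.List.mem_pyRange_one]
      constructor
      · exact_mod_cast hm2
      · omega
    apply this
    have := Int.natCast_dvd_natCast.mpr hmd
    rwa [Int.toNat_of_nonneg (by omega)] at this
  · intro hp i hi
    rw [PySem.List.mem_pyRange_one] at hi
    intro hd
    have hi0 : 0 ≤ i := by omega
    lift i to Nat using hi0 with m
    have hmd : m ∣ n.toNat := by
      have : (m : Int) ∣ (n.toNat : Int) := by rwa [Int.toNat_of_nonneg (by omega)]
      exact_mod_cast this
    rcases hp.eq_one_or_self_of_dvd m hmd with h | h <;> omega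

theorem isPrimeB_eq (n : Int) : isPrimeB n = isPrime n := by
  by_cases h2 : n < 2
  · unfold isPrimeB isPrime; rw [if_pos h2, if_pos h2]
  · rw [not_lt] at h2
    rw [Bool.eq_iff_iff]
    rw [isPrime_iff_prime n h2]
    unfold isPrimeB isPrimeBLoop
    rw [if_neg (by omega)]
    rw [loop_iff_aux (n + 2 - 2).toNat n 2 le_rfl (by omega)]
    rw [Nat.prime_def_le_sqrt]
    constructor
    · intro hall
      refine ⟨by omega, ?_⟩
      intro m hm hms hmd
      refine hall (m : Int) (by exact_mod_cast hm) ?_ ?_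
      · have := Nat.le_sqrt.mp hms
        have : (m * m : Int) ≤ (n.toNat : Int) := by exact_mod_cast this
        rwa [Int.toNat_of_nonneg (by omega)] at this
      · have : (m : Int) ∣ (n.toNat : Int) := Int.natCast_dvd_natCast.mpr hmd
        rwa [Int.toNat_of_nonneg (by omega)] at this
    · rintro ⟨-, hall⟩ j hj hjj hjd
      have hj0 : 0 ≤ j := by omega
      lift j to Nat using hj0 with m
      refine hall m (by exact_mod_cast hj) ?_ ?_
      · rw [Nat.le_sqrt]
        have : ((m * m : Nat) : Int) ≤ ((n.toNat : Nat) : Int) := by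
          push_cast
          rwa [Int.toNat_of_nonneg (by omega)]
        exact_mod_cast this
      · have : (m : Int) ∣ (n.toNat : Int) := by rwa [Int.toNat_of_nonneg (by omega)]
        exact_mod_cast this

theorem isPrime_natPrime (p : Nat) (hp : p.Prime) : isPrime (p : Int) = true := by
  have h2 : 2 ≤ p := hp.two_le
  unfold isPrime
  rw [if_neg (by exact_mod_cast not_lt.mpr (by exact_mod_cast h2))]
  simp only [List.all_eq_true]
  intro i hi
  rw [PySem.List.mem_pyRange_one] at hi
  simp only [Bool.not_eq_eq_eq_not, Bool.not_true, beq_eq_false_iff_ne, ne_eq,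
    PySem.Int.mod_eq_zero_iff_dvd]
  intro hdvd
  have hi0 : 0 ≤ i := le_trans (by norm_num) hi.1
  lift i to Nat using hi0 with m
  have hm : m ∣ p := Int.natCast_dvd_natCast.mp hdvd
  rcases (hp.eq_one_or_self_of_dvd m hm) with h | h
  · have : (2 : Int) ≤ (m : Int) := hi.1
    omega
  · have : (m : Int) < (p : Int) := hi.2
    omega

theorem ex_prime (s : Int) : ∃ j : Nat, isPrime (s + (j : Int)) = true := by
  obtain ⟨p, hp, hpp⟩ := Nat.exists_infinite_primes (s.toNat + 2)
  refine ⟨((p : Int) - s).toNat, ?_⟩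
  have hs : s ≤ (p : Int) := by omega
  have heq : s + (((p : Int) - s).toNat : Int) = (p : Int) := by omega
  rw [heq]; exact isPrime_natPrime p hpp

theorem mu_succ (s : Int) (h : isPrime s = false) :
    Nat.find (ex_prime s) = Nat.find (ex_prime (s + 1)) + 1 := by
  have hspec := Nat.find_spec (ex_prime s)
  have hspec' := Nat.find_spec (ex_prime (s + 1))
  set a := Nat.find (ex_prime s) with ha
  set b := Nat.find (ex_prime (s + 1)) with hb
  have ha0 : a ≠ 0 := by
    intro h0
    rw [h0] at hspec
    simp only [Nat.cast_zero, add_zero] at hspec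
    rw [hspec] at h
    cases h
  have h1 : a ≤ b + 1 := by
    apply Nat.find_le
    have : s + ((b + 1 : Nat) : Int) = (s + 1) + (b : Int) := by push_cast; ring
    rw [this]; exact hspec'
  have h2 : b ≤ a - 1 := by
    apply Nat.find_le
    have : (s + 1) + ((a - 1 : Nat) : Int) = s + (a : Int) := by omega
    rw [this]; exact hspec
  omega

-- the arithmetic fuel really reaches the next prime (Bertrand's postulate for s > 2)
theorem mu_lt_findFuel (s : Int) : Nat.find (ex_prime s) < findFuel s := by
  unfold findFuel
  by_cases hs : s ≤ 2
  · rw [if_pos hs]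
    have hle : Nat.find (ex_prime s) ≤ (2 - s).toNat := by
      apply Nat.find_le
      have : s + (((2 - s).toNat : Nat) : Int) = (2 : Int) := by omega
      rw [this]
      exact isPrime_natPrime 2 Nat.prime_two
    omega
  · rw [if_neg hs]
    have h3 : 3 ≤ s := by omega
    obtain ⟨p, hp, hlt, hle2⟩ := Nat.exists_prime_lt_and_le_two_mul (s - 1).toNat (by omega)
    have hle : Nat.find (ex_prime s) ≤ ((p : Int) - s).toNat := by
      apply Nat.find_le
      have : s + ((((p : Int) - s).toNat : Nat) : Int) = (p : Int) := by omega
      rw [this]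
      exact isPrime_natPrime p hp
    omega

theorem findPrimeFuel_spec (f : Nat) : ∀ s : Int, Nat.find (ex_prime s) < f →
    findPrimeFuel f s = s + (Nat.find (ex_prime s) : Int) := by
  induction f with
  | zero => intro s h; omega
  | succ f ih =>
    intro s h
    by_cases hp : isPrime s = true
    · have h0 : Nat.find (ex_prime s) = 0 := by
        rw [Nat.find_eq_zero]
        simpa using hp
      simp [findPrimeFuel, hp, h0]
    · have hp' : isPrime s = false := by simpa using hp
      have hmu := mu_succ s hp'
      have : findPrimeFuel (f + 1) s = findPrimeFuel f (s + 1) := by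
        simp [findPrimeFuel, hp']
      rw [this, ih (s + 1) (by omega), hmu]
      push_cast
      ring

theorem findPrime_eq (s : Int) : findPrime s = s + (Nat.find (ex_prime s) : Int) :=
  findPrimeFuel_spec (findFuel s) s (mu_lt_findFuel s)

theorem findPrime_of_true (s : Int) (h : isPrime s = true) : findPrime s = s := by
  rw [findPrime_eq]
  have h0 : Nat.find (ex_prime s) = 0 := by
    rw [Nat.find_eq_zero]
    simpa using h
  rw [h0]
  simp

theorem findPrime_of_false (s : Int) (h : isPrime s = false) : findPrime s = findPrime (s + 1) := by
  rw [findPrime_eq, findPrime_eq, mu_succ s h]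
  push_cast
  ring

-- the exact number of iterations B's collection loop needs
def realNeed (p : Int) : Nat → Nat
  | 0 => 0
  | k + 1 => Nat.find (ex_prime p) + 1 + realNeed (findPrime p + 1) k

theorem collectFuel_spec (f : Nat) : ∀ (p : Int) (k : Nat), realNeed p k ≤ f →
    collectFuel f p k = (grab p k).1 := by
  induction f with
  | zero =>
    intro p k h
    cases k with
    | zero => rfl
    | succ k => exact absurd h (by simp [realNeed])
  | succ f ih =>
    intro p k h
    cases k with
    | zero => rfl
    | succ k =>
      by_cases hp : isPrime p = true
      · have h0 : Nat.find (ex_prime p) = 0 := by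
          rw [Nat.find_eq_zero]
          simpa using hp
        have hstep : collectFuel (f + 1) p (k + 1) = p :: collectFuel f (p + 1) k := by
          simp only [collectFuel]
          rw [if_neg (Nat.succ_ne_zero k), if_pos (by rw [isPrimeB_eq]; exact hp)]
          rfl
        rw [hstep, ih (p + 1) k ?_]
        · simp only [grab, findPrime_of_true p hp]
        · have hr : realNeed p (k + 1) = Nat.find (ex_prime p) + 1 + realNeed (findPrime p + 1) k := rfl
          rw [hr, h0, findPrime_of_true p hp] at h
          omega
      · have hp' : isPrime p = false := by simpa using hp
        have hstep : collectFuel (f + 1) p (k + 1) = collectFuel f (p + 1) (k + 1) := by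
          simp only [collectFuel]
          rw [if_neg (Nat.succ_ne_zero k), if_neg (by rw [isPrimeB_eq]; simp [hp'])]
        rw [hstep, ih (p + 1) (k + 1) ?_]
        · simp only [grab, findPrime_of_false p hp']
        · have hr : realNeed p (k + 1) = Nat.find (ex_prime p) + 1 + realNeed (findPrime p + 1) k := rfl
          have hr' : realNeed (p + 1) (k + 1)
              = Nat.find (ex_prime (p + 1)) + 1 + realNeed (findPrime (p + 1) + 1) k := rfl
          rw [hr, mu_succ p hp', findPrime_of_false p hp'] at h
          rw [hr']
          omega

theorem realNeed_le_needed (k : Nat) : ∀ p : Int, realNeed p k ≤ needed p k := by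
  induction k with
  | zero => intro p; exact le_rfl
  | succ k ih =>
    intro p
    have hr : realNeed p (k + 1) = Nat.find (ex_prime p) + 1 + realNeed (findPrime p + 1) k := rfl
    have hn : needed p (k + 1) = findFuel p + needed (findPrime p + 1) k := rfl
    have := mu_lt_findFuel p
    have := ih (findPrime p + 1)
    omega

theorem collect_eq (k : Nat) : ∀ s : Int, collectB s k = (grab s k).1 := by
  intro s
  exact collectFuel_spec (needed s k) s k (realNeed_le_needed k s)

theorem fmt_tail (t : List Int) : ∀ (i : Int) (acc : String), 1 ≤ i →
    (PySem.List.enumerate t i).foldl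
      (fun (rs : String) (e : Int × Int) =>
        if e.1 == 0 then rs ++ PySem.Int.toStr e.2
        else if PySem.Str.len (PySem.Int.toStr e.2) == 1 then rs ++ ("  " ++ PySem.Int.toStr e.2)
        else rs ++ (" " ++ PySem.Int.toStr e.2)) acc
    = acc ++ PySem.Str.join "" (t.map cellF) := by
  induction t with
  | nil =>
    intro i acc hi
    simp only [PySem.List.enumerate_nil, List.foldl_nil, List.map_nil, join_nil_str,
      String.append_empty]
  | cons y t ih =>
    intro i acc hi
    simp only [PySem.List.enumerate_cons, List.foldl_cons]
    have hstep : (if (i == 0) = true then acc ++ PySem.Int.toStr y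
        else if (PySem.Str.len (PySem.Int.toStr y) == 1) = true then acc ++ ("  " ++ PySem.Int.toStr y)
        else acc ++ (" " ++ PySem.Int.toStr y)) = acc ++ cellF y := by
      rw [if_neg (by simpa using (by omega : i ≠ 0))]
      unfold cellF
      by_cases hc : (PySem.Str.len (PySem.Int.toStr y) == 1) = true
      · rw [if_pos hc, if_pos hc]
      · rw [if_neg hc, if_neg hc]
    rw [hstep, ih (i + 1) (acc ++ cellF y) (by omega), List.map_cons, join_cons_str,
      ← String.append_assoc]

theorem fmtA_eq (row : List Int) :
    (PySem.List.enumerate row 0).foldl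
      (fun (rs : String) (e : Int × Int) =>
        if e.1 == 0 then rs ++ PySem.Int.toStr e.2
        else if PySem.Str.len (PySem.Int.toStr e.2) == 1 then rs ++ ("  " ++ PySem.Int.toStr e.2)
        else rs ++ (" " ++ PySem.Int.toStr e.2)) ""
    = fmtRow row := by
  cases row with
  | nil =>
    simp [PySem.List.enumerate_nil, fmtRow, headCell, join_nil_str]
  | cons x t =>
    simp only [PySem.List.enumerate_cons, List.foldl_cons, zero_add]
    rw [fmt_tail t 1 _ le_rfl]
    simp only [fmtRow, headCell, List.tail_cons, List.singleton_append, join_cons_str]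
    congr 1

theorem inner_eq (l : List Int) : ∀ (row : List Int) (st : Int),
    l.foldl (fun (a : List Int × Int) (_j : Int) =>
        (a.1 ++ [findPrime a.2], findPrime a.2 + 1)) (row, st)
    = (row ++ (grab st l.length).1, (grab st l.length).2) := by
  induction l with
  | nil => intro row st; simp [grab]
  | cons x l ih =>
    intro row st
    simp only [List.foldl_cons, List.length_cons]
    rw [ih]
    simp [grab, List.append_assoc]

-- cursor after h rows
def rowsState (w : Nat) : Int → Nat → Int
  | s, 0 => s
  | s, h + 1 => rowsState w (grab s w).2 h

theorem outerA (width : Int) (l : List Int) : ∀ (res : String) (st : Int),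
    l.foldl (fun (acc : String × Int) (_i : Int) =>
      (acc.1 ++
        ((PySem.List.enumerate ((PySem.List.pyRange 0 width 1).foldl
            (fun (a : List Int × Int) (_j : Int) => (a.1 ++ [findPrime a.2], findPrime a.2 + 1))
            (([] : List Int), acc.2)).1 0).foldl
          (fun (rs : String) (e : Int × Int) =>
            if e.1 == 0 then rs ++ PySem.Int.toStr e.2
            else if PySem.Str.len (PySem.Int.toStr e.2) == 1 then rs ++ ("  " ++ PySem.Int.toStr e.2)
            else rs ++ (" " ++ PySem.Int.toStr e.2)) "" ++ "\n"),
       ((PySem.List.pyRange 0 width 1).foldl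
            (fun (a : List Int × Int) (_j : Int) => (a.1 ++ [findPrime a.2], findPrime a.2 + 1))
            (([] : List Int), acc.2)).2)) (res, st)
    = (res ++ rowsStr width.toNat st l.length, rowsState width.toNat st l.length) := by
  induction l with
  | nil => intro res st; simp [rowsStr, rowsState, String.append_empty]
  | cons x l ih =>
    intro res st
    simp only [List.foldl_cons, List.length_cons]
    rw [ih]
    simp only [inner_eq, List.nil_append, fmtA_eq, PySem.List.length_pyRange_one, Int.sub_zero]
    have hrs : rowsStr width.toNat st (l.length + 1)
        = (fmtRow (grab st width.toNat).1 ++ "\n") ++ rowsStr width.toNat (grab st width.toNat).2 l.length := rfl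
    have hst : rowsState width.toNat st (l.length + 1)
        = rowsState width.toNat (grab st width.toNat).2 l.length := rfl
    rw [hrs, hst, String.append_assoc]

theorem rows_snoc (w : Nat) (h : Nat) : ∀ s : Int,
    rowsStr w s (h + 1) = rowsStr w s h ++ (fmtRow (grab (grab s (w * h)).2 w).1 ++ "\n") := by
  induction h with
  | zero =>
    intro s
    simp [rowsStr, grab, String.append_empty, String.empty_append]
  | succ h ih =>
    intro s
    have hl : rowsStr w s (h + 2)
        = (fmtRow (grab s w).1 ++ "\n") ++ rowsStr w (grab s w).2 (h + 1) := rfl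
    have hr : rowsStr w s (h + 1)
        = (fmtRow (grab s w).1 ++ "\n") ++ rowsStr w (grab s w).2 h := rfl
    have hc : (grab s (w * (h + 1))).2 = (grab (grab s w).2 (w * h)).2 := by
      have h1 : w * (h + 1) = w + w * h := by ring
      rw [h1, grab_add]
    rw [hl, ih, hr, hc]
    simp only [String.append_assoc]

theorem slice_take (P Q R : List Int) (w h : Nat) (hP : P.length = w * h) (hQ : Q.length = w) :
    PySem.List.slice (P ++ (Q ++ R)) (some (((h * w : Nat) : Int))) (some ((((h + 1) * w : Nat) : Int))) = Q := by
  rw [PySem.List.slice_natCast]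
  have hd : (P ++ (Q ++ R)).drop (h * w) = Q ++ R := by
    have hl : h * w = P.length := by rw [hP]; ring
    rw [hl, List.drop_left]
  rw [hd]
  have ht : (h + 1) * w - h * w = w := by
    have : (h + 1) * w = h * w + w := by ring
    omega
  rw [ht, List.take_append_of_le_length (by omega), ← hQ, List.take_length]

theorem fold_B_gen (w : Nat) (h : Nat) : ∀ (st : Int) (out : String) (Q : List Int),
    (PySem.List.pyRange 0 (h : Int) 1).foldl
      (fun (out : String) (r : Int) =>
        out ++ (PySem.Str.join ""
          (headCell (PySem.List.slice ((grab st (w * h)).1 ++ Q) (some (r * (w : Int))) (some ((r + 1) * (w : Int)))) ++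
           (PySem.List.slice (PySem.List.slice ((grab st (w * h)).1 ++ Q) (some (r * (w : Int))) (some ((r + 1) * (w : Int)))) (some 1) none).map
             (fun num => (if PySem.Str.len (PySem.Int.toStr num) == 1 then "  " else " ") ++ PySem.Int.toStr num)) ++ "\n")) out
    = out ++ rowsStr w st h := by
  induction h with
  | zero =>
    intro st out Q
    simp [PySem.List.pyRange_one_eq_nil, rowsStr, String.append_empty]
  | succ h ih =>
    intro st out Q
    have hsplit : (grab st (w * (h + 1))).1
        = (grab st (w * h)).1 ++ (grab (grab st (w * h)).2 w).1 := by
      have h1 : w * (h + 1) = w * h + w := by ring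
      rw [h1, grab_add]
    rw [hsplit]
    rw [show ((h + 1 : Nat) : Int) = (h : Int) + 1 by push_cast; ring]
    rw [PySem.List.pyRange_one_succ_right (Int.natCast_nonneg h), List.foldl_append]
    simp only [List.append_assoc, List.foldl_cons, List.foldl_nil]
    rw [ih st out ((grab (grab st (w * h)).2 w).1 ++ Q)]
    have hsl : PySem.List.slice
        ((grab st (w * h)).1 ++ ((grab (grab st (w * h)).2 w).1 ++ Q))
        (some ((h : Int) * (w : Int))) (some (((h : Int) + 1) * (w : Int)))
        = (grab (grab st (w * h)).2 w).1 := by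
      rw [show ((h : Int)) * (w : Int) = ((h * w : Nat) : Int) by push_cast; ring,
        show ((h : Int) + 1) * (w : Int) = (((h + 1) * w : Nat) : Int) by push_cast; ring]
      exact slice_take _ _ _ w h (grab_len _ _) (grab_len _ _)
    rw [hsl]
    have hfmt : PySem.Str.join ""
        (headCell (grab (grab st (w * h)).2 w).1 ++
          (PySem.List.slice (grab (grab st (w * h)).2 w).1 (some 1) none).map
            (fun num => (if PySem.Str.len (PySem.Int.toStr num) == 1 then "  " else " ") ++ PySem.Int.toStr num))
        = fmtRow (grab (grab st (w * h)).2 w).1 := by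
      rw [PySem.List.slice_from_one]; rfl
    rw [hfmt, rows_snoc w h st, String.append_assoc]
-- ===== VERDICT (by name: the statement is the Claim_ definition above) =====
theorem generate_primes_grid_spec : Claim_equal_generate_primes_grid := by
  unfold Claim_equal_generate_primes_grid
  intro width height start _
  unfold Spec_generate_primes_grid
  show generate_primes_grid width height start = generate_primes_grid_alt width height start
  simp only [generate_primes_grid, generate_primes_grid_alt]
  rw [outerA width (PySem.List.pyRange (start + 1) (start + 1 + height) 1) "" (start + 1)]
  rw [show (if width > 0 then width else 0) = (width.toNat : Int) by split_ifs <;> omega]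
  rw [show (if height > 0 then height else 0) = (height.toNat : Int) by split_ifs <;> omega]
  rw [show ((width.toNat : Int) * (height.toNat : Int)) = ((width.toNat * height.toNat : Nat) : Int) by push_cast; ring]
  rw [Int.toNat_natCast, collect_eq]
  rw [show (grab (start + 1) (width.toNat * height.toNat)).1
      = (grab (start + 1) (width.toNat * height.toNat)).1 ++ ([] : List Int) from (List.append_nil _).symm]
  rw [fold_B_gen width.toNat height.toNat (start + 1) "" []]
  rw [PySem.List.length_pyRange_one,
    show (start + 1 + height - (start + 1)) = height by ring]
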